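-- pv_equiv track=rewrite | github.com/aepyornis/nyc-stabilization-unit-counts | parse2.py | mailing_address
-- ===== SOURCE A (Python) =====
-- def mailing_address(lines):
--     """
--     Here is a example of lines that this fuction is trying to parse:
--
--                                                                                  Mailing address:
--        Owner name: 530 CANAL ST. REALTY CORP.                                    530 CANAL ST. REALTY CORP.
--        Property address: 530 CANAL ST.                                           271 MADISON AVE. STE 1101
--        Borough, block & lot: MANHATTAN (1), 00595, 0011                          NEW YORK , NY 10016-1001
--
--     """
--     address_accumulator = []
--     line_reader = iter(lines)
--     rm_eol_strip = lambda line: line.replace('\n', '').strip()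
--     for line in line_reader:
--         if "mailing address" in line.lower():
--             # nested loop on same iterable ... bad idea? ... oh well ...
--             for address_part in line_reader:
--                 ll = address_part.lower()
--                 if 'owner name' in ll or 'property address' in ll or 'borough' in ll:
--                     address_accumulator.append(rm_eol_strip(address_part).split('     ')[-1].strip())
--                 elif len(address_part.replace('\n', '').strip()) > 0:
--                     address_accumulator.append(rm_eol_strip(address_part))
--                 else:
--                     return "\n".join(address_accumulator)
-- ===== SOURCE B (Python) =====
-- def _format_part(part):
--     cleaned = part.replace('\n', '').strip()
--     ll = part.lower()
--     if 'owner name' in ll or 'property address' in ll or 'borough' in ll: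
--         return cleaned.split('     ')[-1].strip()
--     return cleaned
--
--
-- def mailing_address(lines):
--     lines = list(lines)
--     starts = [i for i, line in enumerate(lines)
--               if "mailing address" in line.lower()]
--     if not starts:
--         return None
--     tail = lines[starts[0] + 1:]
--     blanks = [j for j, part in enumerate(tail)
--               if not part.replace('\n', '').strip()]
--     if not blanks:
--         return None
--     return "\n".join(_format_part(p) for p in tail[:blanks[0]])
-- ===== Notes on version B (the rewrite author's own statement) =====
-- stated objective: simpler
-- what changed: A's nested for-loops consuming one shared iterator with per-line accumulator state are replaced by a boundary-finding decomposition: locate the first 'mailing address' line and the first blank line after it, then map a pure per-line formatter over the slice between them and join.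
import Mathlib
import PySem

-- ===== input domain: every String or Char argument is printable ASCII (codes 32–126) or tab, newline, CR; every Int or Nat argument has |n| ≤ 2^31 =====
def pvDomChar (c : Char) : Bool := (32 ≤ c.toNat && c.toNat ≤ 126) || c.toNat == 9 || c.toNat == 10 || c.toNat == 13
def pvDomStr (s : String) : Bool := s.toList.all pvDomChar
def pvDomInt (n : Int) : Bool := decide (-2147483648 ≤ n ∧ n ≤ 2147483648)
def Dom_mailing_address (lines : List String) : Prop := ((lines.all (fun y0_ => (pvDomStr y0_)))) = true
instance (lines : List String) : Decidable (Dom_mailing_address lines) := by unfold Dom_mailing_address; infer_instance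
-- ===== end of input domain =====

-- B replaces A's nested loops over one shared iterator by a find-the-block-boundaries-then-map decomposition (objective: simpler); same return value, no side effects.

-- ===== PORT A =====
-- rm_eol_strip = lambda line: line.replace('\n', '').strip()
def pvRmEolStrip (line : String) : String :=
  PySem.Str.strip (PySem.Str.replace line "\n" "")

-- the inner 'for address_part in line_reader' loop; returns none when the iterator is
-- exhausted (the function then falls off the outer loop and returns None)
def pvInnerA (acc : List String) : List String → Option String
  | [] => none
  | p :: rest =>
    let ll := PySem.Str.lower p
    if PySem.Str.isIn "owner name" ll || PySem.Str.isIn "property address" ll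
        || PySem.Str.isIn "borough" ll then
      -- rm_eol_strip(address_part).split('     ')[-1].strip(); split() is never empty, so [-1] cannot raise
      pvInnerA (acc ++ [PySem.Str.strip
        ((PySem.List.pyGet? ((PySem.Str.split? (pvRmEolStrip p) "     ").getD []) (-1)).getD "")]) rest
    else if 0 < PySem.Str.len (pvRmEolStrip p) then
      pvInnerA (acc ++ [pvRmEolStrip p]) rest
    else
      some (PySem.Str.join "\n" acc)

def mailing_address : List String → Option String
  | [] => none
  | l :: rest =>
    if PySem.Str.isIn "mailing address" (PySem.Str.lower l) then pvInnerA [] rest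
    else mailing_address rest

-- ===== PORT B =====
def pvFormatPart (part : String) : String :=
  let cleaned := PySem.Str.strip (PySem.Str.replace part "\n" "")
  let ll := PySem.Str.lower part
  if PySem.Str.isIn "owner name" ll || PySem.Str.isIn "property address" ll
      || PySem.Str.isIn "borough" ll then
    PySem.Str.strip ((PySem.List.pyGet? ((PySem.Str.split? cleaned "     ").getD []) (-1)).getD "")
  else cleaned

def mailing_address_alt (lines : List String) : Option String :=
  match ((PySem.List.enumerate lines).filter
      (fun p => PySem.Str.isIn "mailing address" (PySem.Str.lower p.2))).map (fun p => p.1) with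
  | [] => none
  | i :: _ =>
    let tail := PySem.List.slice lines (some (i + 1)) none
    match ((PySem.List.enumerate tail).filter
        (fun p => PySem.Str.len (PySem.Str.strip (PySem.Str.replace p.2 "\n" "")) == 0)).map
        (fun p => p.1) with
    | [] => none
    | j :: _ =>
      some (PySem.Str.join "\n" ((PySem.List.slice tail none (some j)).map pvFormatPart))

-- ===== PRECONDITION & SPEC =====
def Spec_mailing_address (lines : List String) (out : Option String) : Prop := out = mailing_address_alt lines
instance (lines : List String) (out : Option String) : Decidable (Spec_mailing_address lines out) := by unfold Spec_mailing_address; infer_instance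

-- ===== CLAIM (what is proved, stated in full; the proofs are below) =====
def Claim_equal_mailing_address : Prop := ∀ (lines : List String), Dom_mailing_address lines → Spec_mailing_address lines (mailing_address lines)

-- ===== LEMMAS AND PROOFS =====

-- proof-side abbreviations for the three tests both programs make
def pvMail (s : String) : Bool := PySem.Str.isIn "mailing address" (PySem.Str.lower s)

def pvKw (s : String) : Bool :=
  PySem.Str.isIn "owner name" (PySem.Str.lower s)
    || PySem.Str.isIn "property address" (PySem.Str.lower s)
    || PySem.Str.isIn "borough" (PySem.Str.lower s)

def pvBlank (s : String) : Bool :=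
  PySem.Str.len (PySem.Str.strip (PySem.Str.replace s "\n" "")) == 0

-- the common characterisation both ports are reduced to
def pvTailB (tail : List String) : Option String :=
  match List.findIdx? pvBlank tail with
  | none => none
  | some j => some (PySem.Str.join "\n" ((tail.take j).map pvFormatPart))

def pvChar (lines : List String) : Option String :=
  match List.findIdx? pvMail lines with
  | none => none
  | some k => pvTailB (lines.drop (k + 1))

-- replace(s, '\n', '') deletes the newlines
lemma replace_go_nl : ∀ (fuel : Nat) (l acc : List Char), l.length ≤ fuel →
    PySem.Chars.replace.go ['\n'] [] fuel l acc = acc.reverse ++ l.filter (fun c => !(c == '\n'))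
  | 0, l, acc, h => by
    have : l = [] := List.length_eq_zero_iff.mp (Nat.le_zero.mp h)
    subst this; simp [PySem.Chars.replace.go]
  | fuel + 1, [], acc, _ => by simp [PySem.Chars.replace.go]
  | fuel + 1, c :: t, acc, h => by
    rw [PySem.Chars.replace.go]
    by_cases hc : c = '\n'
    · subst hc
      rw [if_pos (by simp [List.isPrefixOf])]
      have hd : List.drop (['\n'] : List Char).length ('\n' :: t) = t := by simp
      rw [hd, replace_go_nl fuel t ((([] : List Char)).reverse ++ acc) (by simpa using h)]
      simp
    · have hp : (['\n'].isPrefixOf (c :: t)) = false := by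
        have hne : ('\n' == c) = false := beq_eq_false_iff_ne.mpr (Ne.symm hc)
        simp [List.isPrefixOf, hne]
      rw [hp]
      simp only [Bool.false_eq_true, if_false]
      rw [replace_go_nl fuel t (c :: acc) (by simpa using Nat.succ_le_succ_iff.mp h)]
      simp [hc]

lemma replace_nl (s : List Char) :
    PySem.Chars.replace s ['\n'] [] = s.filter (fun c => !(c == '\n')) := by
  rw [PySem.Chars.replace]
  simp only [List.isEmpty_cons, Bool.false_eq_true, if_false]
  simpa using replace_go_nl s.length s [] le_rfl

-- strip(s) is empty iff every character is whitespace
lemma strip_eq_nil_iff (s : List Char) :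
    PySem.Chars.strip s = [] ↔ ∀ a ∈ s, PySem.Chars.isspace a = true := by
  unfold PySem.Chars.strip PySem.Chars.rstrip PySem.Chars.lstrip
  constructor
  · intro h a ha
    rw [List.reverse_eq_nil_iff, List.dropWhile_eq_nil_iff] at h
    have hsplit : a ∈ List.takeWhile PySem.Chars.isspace s
        ++ List.dropWhile PySem.Chars.isspace s := by
      rw [List.takeWhile_append_dropWhile]; exact ha
    rcases List.mem_append.mp hsplit with hm | hm
    · exact List.mem_takeWhile_imp hm
    · exact h a (List.mem_reverse.mpr hm)
  · intro h
    rw [List.dropWhile_eq_nil_iff.mpr h]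
    simp

-- a character whose lowercase is a lowercase letter is neither whitespace nor '\n'
lemma lower_letter {c d : Char} (h : PySem.Chars.lowerChar c = d)
    (hd1 : PySem.Chars.isspace d = false) (hd2 : 97 ≤ d.toNat) (hd3 : d.toNat ≤ 122) :
    PySem.Chars.isspace c = false ∧ (c == '\n') = false := by
  unfold PySem.Chars.lowerChar at h
  by_cases hu : PySem.Chars.isupper c = true
  · have hb : 65 ≤ c.toNat ∧ c.toNat ≤ 90 := by
      unfold PySem.Chars.isupper at hu
      simp only [Bool.and_eq_true, decide_eq_true_eq] at hu
      obtain ⟨ha, hz⟩ := hu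
      rw [Char.le_def, UInt32.le_iff_toNat_le] at ha hz
      exact ⟨by simpa using ha, by simpa using hz⟩
    constructor
    · unfold PySem.Chars.isspace
      simp only [Bool.or_eq_false_iff, Bool.and_eq_false_iff, decide_eq_false_iff_not]
      omega
    · rw [beq_eq_false_iff_ne]
      intro e; subst e; simp at hb
  · rw [if_neg hu] at h
    subst h
    refine ⟨hd1, ?_⟩
    rw [beq_eq_false_iff_ne]
    intro e; subst e; simp at hd2

-- a line whose lowercase contains sub (which has a lowercase letter d) is not blank
lemma sub_nonblank (p : String) (sub : List Char) (d : Char) (hmem : d ∈ sub)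
    (hd1 : PySem.Chars.isspace d = false) (hd2 : 97 ≤ d.toNat) (hd3 : d.toNat ≤ 122)
    (hin : sub <:+: PySem.Chars.lower p.toList) :
    pvBlank p = false := by
  have hdmem : d ∈ PySem.Chars.lower p.toList := hin.subset hmem
  unfold PySem.Chars.lower at hdmem
  rcases List.mem_map.mp hdmem with ⟨c, hc, hlc⟩
  obtain ⟨hns, hnl⟩ := lower_letter hlc hd1 hd2 hd3
  unfold pvBlank
  rw [beq_eq_false_iff_ne]
  rw [PySem.Str.len_eq, PySem.Str.toList_strip, PySem.Str.toList_replace]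
  intro hlen
  have h0 : (PySem.Chars.strip (PySem.Chars.replace p.toList "\n".toList "".toList)).length = 0 := by
    exact_mod_cast hlen
  have hnil := List.length_eq_zero_iff.mp h0
  have hall := (strip_eq_nil_iff _).mp hnil
  have hcmem : c ∈ PySem.Chars.replace p.toList "\n".toList "".toList := by
    have : "\n".toList = ['\n'] := by decide
    rw [this]
    have : "".toList = ([] : List Char) := by decide
    rw [this, replace_nl]
    exact List.mem_filter.mpr ⟨hc, by simp [hnl]⟩
  have := hall c hcmem
  rw [hns] at this
  exact Bool.false_ne_true this

-- a keyword line is never blank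
lemma kw_not_blank {p : String} (h : pvKw p = true) : pvBlank p = false := by
  unfold pvKw at h
  simp only [Bool.or_eq_true] at h
  rcases h with (h1 | h2) | h3
  · have hin := (PySem.Str.isIn_iff_infix _ _).mp h1
    rw [PySem.Str.toList_lower] at hin
    exact sub_nonblank p _ 'w' (by decide) (by decide) (by decide) (by decide) hin
  · have hin := (PySem.Str.isIn_iff_infix _ _).mp h2
    rw [PySem.Str.toList_lower] at hin
    exact sub_nonblank p _ 'p' (by decide) (by decide) (by decide) (by decide) hin
  · have hin := (PySem.Str.isIn_iff_infix _ _).mp h3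
    rw [PySem.Str.toList_lower] at hin
    exact sub_nonblank p _ 'b' (by decide) (by decide) (by decide) (by decide) hin

-- head of B's [i for i, x in enumerate(xs) if q(x)] is findIdx?
lemma enumFilterHead (q : String → Bool) (xs : List String) (s : Int) :
    (((PySem.List.enumerate xs s).filter (fun p => q p.2)).map (fun p => p.1)).head? =
      (List.findIdx? q xs).map (fun k => s + (k : Int)) := by
  induction xs generalizing s with
  | nil => simp [PySem.List.enumerate_nil]
  | cons x xs ih =>
    rw [PySem.List.enumerate_cons, List.findIdx?_cons]
    by_cases hq : q x = true
    · simp [hq]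
    · rw [List.filter_cons_of_neg (by simpa using hq), if_neg (by simpa using hq)]
      rw [ih (s + 1)]
      cases hf : List.findIdx? q xs with
      | none => simp
      | some k => simp; ring

-- A's inner loop, characterised by the first blank line
lemma innerA_eq (tail : List String) : ∀ (acc : List String),
    pvInnerA acc tail =
      match List.findIdx? pvBlank tail with
      | none => none
      | some j => some (PySem.Str.join "\n" (acc ++ (tail.take j).map pvFormatPart)) := by
  induction tail with
  | nil => intro acc; simp [pvInnerA]
  | cons p rest ih =>
    intro acc
    rw [List.findIdx?_cons]
    by_cases hkw : pvKw p = true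
    · have hb : pvBlank p = false := kw_not_blank hkw
      unfold pvKw at hkw
      simp only [pvInnerA]
      rw [if_pos hkw, ih, hb]
      simp only [Bool.false_eq_true, if_false]
      have hfmt : pvFormatPart p = PySem.Str.strip
          ((PySem.List.pyGet? ((PySem.Str.split? (pvRmEolStrip p) "     ").getD []) (-1)).getD "") := by
        simp only [pvFormatPart]
        rw [if_pos hkw]
        unfold pvRmEolStrip
        rfl
      cases hf : List.findIdx? pvBlank rest with
      | none => simp
      | some j => simp [hfmt, List.take_succ_cons]
    · unfold pvKw at hkw
      by_cases hlen : 0 < PySem.Str.len (pvRmEolStrip p)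
      · have hb : pvBlank p = false := by
          unfold pvBlank
          unfold pvRmEolStrip at hlen
          rw [beq_eq_false_iff_ne]
          omega
        simp only [pvInnerA]
        rw [if_neg hkw, if_pos hlen, ih, hb]
        simp only [Bool.false_eq_true, if_false]
        have hfmt : pvFormatPart p = pvRmEolStrip p := by
          simp only [pvFormatPart]
          rw [if_neg hkw]
          unfold pvRmEolStrip
          rfl
        cases hf : List.findIdx? pvBlank rest with
        | none => simp
        | some j => simp [hfmt, List.take_succ_cons]
      · have hb : pvBlank p = true := by
          unfold pvBlank
          unfold pvRmEolStrip at hlen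
          have hge : 0 ≤ PySem.Str.len (PySem.Str.strip (PySem.Str.replace p "\n" "")) := by
            rw [PySem.Str.len_eq]; positivity
          rw [beq_iff_eq]
          omega
        simp only [pvInnerA]
        rw [if_neg hkw, if_neg hlen, hb]
        simp

lemma pvChar_cons_pos {l : String} {rest : List String} (hm : pvMail l = true) :
    pvChar (l :: rest) = pvTailB rest := by
  unfold pvChar
  rw [List.findIdx?_cons, if_pos hm]
  simp

lemma pvChar_cons_neg {l : String} {rest : List String} (hm : ¬ pvMail l = true) :
    pvChar (l :: rest) = pvChar rest := by
  unfold pvChar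
  rw [List.findIdx?_cons, if_neg hm]
  cases List.findIdx? pvMail rest <;> simp

-- port A equals the characterisation
lemma A_eq_char : ∀ (lines : List String), mailing_address lines = pvChar lines := by
  intro lines
  induction lines with
  | nil => simp [mailing_address, pvChar]
  | cons l rest ih =>
    by_cases hm : pvMail l = true
    · rw [pvChar_cons_pos hm]
      have hm' : PySem.Str.isIn "mailing address" (PySem.Str.lower l) = true := hm
      simp only [mailing_address]
      rw [if_pos hm', innerA_eq rest []]
      unfold pvTailB
      cases List.findIdx? pvBlank rest <;> simp
    · rw [pvChar_cons_neg hm, ← ih]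
      have hm' : ¬ PySem.Str.isIn "mailing address" (PySem.Str.lower l) = true := hm
      simp only [mailing_address]
      rw [if_neg hm']

-- port B equals the characterisation
lemma B_eq_char : ∀ (lines : List String), mailing_address_alt lines = pvChar lines := by
  intro lines
  unfold mailing_address_alt
  have hS := enumFilterHead pvMail lines 0
  cases hs : ((PySem.List.enumerate lines).filter
      (fun p => PySem.Str.isIn "mailing address" (PySem.Str.lower p.2))).map (fun p => p.1) with
  | nil =>
    rw [show (((PySem.List.enumerate lines).filter (fun p => pvMail p.2)).map (fun p => p.1))
        = [] from hs] at hS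
    simp only [List.head?_nil] at hS
    unfold pvChar
    cases hf : List.findIdx? pvMail lines with
    | none => rfl
    | some k => rw [hf] at hS; simp at hS
  | cons i r =>
    rw [show (((PySem.List.enumerate lines).filter (fun p => pvMail p.2)).map (fun p => p.1))
        = i :: r from hs] at hS
    simp only [List.head?_cons] at hS
    unfold pvChar
    cases hf : List.findIdx? pvMail lines with
    | some k =>
      rw [hf] at hS
      simp at hS
      have hi : i = (k : Int) := by omega
      subst hi
      dsimp only
      have hslice : PySem.List.slice lines (some ((k : Int) + 1)) none = lines.drop (k + 1) := by
        have : ((k : Int) + 1) = ((k + 1 : Nat) : Int) := by push_cast; ring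
        rw [this, PySem.List.slice_from_natCast]
      rw [hslice]
      set tail := lines.drop (k + 1) with htail
      have hT := enumFilterHead pvBlank tail 0
      cases ht : ((PySem.List.enumerate tail).filter
          (fun p => PySem.Str.len (PySem.Str.strip (PySem.Str.replace p.2 "\n" "")) == 0)).map
          (fun p => p.1) with
      | nil =>
        rw [show (((PySem.List.enumerate tail).filter (fun p => pvBlank p.2)).map (fun p => p.1))
            = [] from ht] at hT
        simp only [List.head?_nil] at hT
        unfold pvTailB
        cases hg : List.findIdx? pvBlank tail with
        | none => rfl
        | some j => rw [hg] at hT; simp at hT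
      | cons j rr =>
        rw [show (((PySem.List.enumerate tail).filter (fun p => pvBlank p.2)).map (fun p => p.1))
            = j :: rr from ht] at hT
        simp only [List.head?_cons] at hT
        unfold pvTailB
        cases hg : List.findIdx? pvBlank tail with
        | none => rw [hg] at hT; simp at hT
        | some j' =>
          rw [hg] at hT
          simp at hT
          have hj : j = (j' : Int) := by omega
          subst hj
          dsimp only
          rw [PySem.List.slice_to_natCast]
    | none => rw [hf] at hS; simp at hS

-- ===== VERDICT (by name: the statement is the Claim_ definition above) =====
theorem mailing_address_spec : Claim_equal_mailing_address := by
  intro lines _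
  unfold Spec_mailing_address
  rw [A_eq_char, B_eq_char]
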